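-- pv_equiv track=rewrite | github.com/Blagish/danika | app/dice/trace.py | _pick_trace
-- ===== SOURCE A (Python) =====
-- def _bold(n: int) -> str:
--     return f"[**{n}**]"
--
-- def _pick_trace(rolls: list[int], take: int, highest: bool) -> str:
--     """Форматирует броски pick: взятые кубы жирным, отброшенные зачёркнутым."""
--     selected = sorted(rolls, reverse=highest)[:take]
--     remaining = list(selected)
--     parts = []
--     for r in rolls:
--         if r in remaining:
--             remaining.remove(r)
--             parts.append(_bold(r))
--         else:
--             parts.append(f"~~{r}~~")
--     return " + ".join(parts)
-- ===== SOURCE B (Python) =====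
-- def _bold(n: int) -> str:
--     return f"[**{n}**]"
--
-- def _pick_trace(rolls: list[int], take: int, highest: bool) -> str:
--     """Index-based selection: stable argsort of positions, pick a static set of
--     indices; no multiset consumption or counters."""
--     order = sorted(range(len(rolls)), key=lambda i: rolls[i], reverse=highest)
--     picked = set(order[:take])
--     return " + ".join(
--         _bold(r) if i in picked else f"~~{r}~~" for i, r in enumerate(rolls)
--     )
-- ===== Notes on version B (the rewrite author's own statement) =====
-- stated objective: alternative
-- what changed: Replaces A's value-multiset consumption (per roll: membership test plus remove on a shrinking 'remaining' list) with index-based selection: a stable argsort of the positions, a static set of the first 'take' positions, and a pure per-position set lookup over enumerate(rolls).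
import Mathlib
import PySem

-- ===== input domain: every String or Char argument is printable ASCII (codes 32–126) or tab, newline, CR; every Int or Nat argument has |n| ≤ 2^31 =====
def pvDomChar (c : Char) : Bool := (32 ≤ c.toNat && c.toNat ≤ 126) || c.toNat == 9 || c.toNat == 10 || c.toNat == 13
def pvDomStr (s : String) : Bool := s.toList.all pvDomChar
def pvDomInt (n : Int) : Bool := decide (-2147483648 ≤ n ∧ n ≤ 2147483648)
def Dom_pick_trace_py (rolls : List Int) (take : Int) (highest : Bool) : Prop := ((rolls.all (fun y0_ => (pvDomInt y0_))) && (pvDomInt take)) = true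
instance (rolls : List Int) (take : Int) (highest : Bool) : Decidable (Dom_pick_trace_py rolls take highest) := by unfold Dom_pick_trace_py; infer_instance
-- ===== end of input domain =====

-- B replaces A's mutating consumption of a 'remaining' value-multiset (membership test
-- plus remove per roll) with index-based selection: a stable argsort of the positions,
-- a static set of picked positions, and a pure per-position lookup (alternative decomposition).

-- ===== PORT A =====
-- Python helper _bold, and the f"~~{r}~~" literal, shared by both versions
def pvBold (n : Int) : String := "[**" ++ PySem.Int.toStr n ++ "**]"
def pvStrike (n : Int) : String := "~~" ++ PySem.Int.toStr n ++ "~~"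

def pick_trace_py (rolls : List Int) (take : Int) (highest : Bool) : String :=
  let selected := PySem.List.slice (PySem.List.sorted rolls (fun x => x) highest) none (some take)
  let res := rolls.foldl (fun (st : List Int × List String) r =>
      if st.1.contains r then
        ((PySem.List.remove? st.1 r).getD st.1, st.2 ++ [pvBold r])
      else
        (st.1, st.2 ++ [pvStrike r])) (selected, [])
  PySem.Str.join " + " res.2

-- ===== PORT B =====
def pick_trace_py_alt (rolls : List Int) (take : Int) (highest : Bool) : String :=
  let order := PySem.List.sorted (PySem.List.pyRange 0 (PySem.List.len rolls) 1)
      (fun i => PySem.List.pyGetD rolls i 0) highest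
  let picked := PySem.Set.ofList (PySem.List.slice order none (some take))
  PySem.Str.join " + " ((PySem.List.enumerate rolls).map
      (fun p => if PySem.Set.contains picked p.1 then pvBold p.2 else pvStrike p.2))

-- ===== PRECONDITION & SPEC =====
def Spec_pick_trace_py (rolls : List Int) (take : Int) (highest : Bool) (out : String) : Prop := out = pick_trace_py_alt rolls take highest
instance (rolls : List Int) (take : Int) (highest : Bool) (out : String) : Decidable (Spec_pick_trace_py rolls take highest out) := by unfold Spec_pick_trace_py; infer_instance

-- ===== CLAIM (what is proved, stated in full; the proofs are below) =====
def Claim_equal_pick_trace_py : Prop := ∀ (rolls : List Int) (take : Int) (highest : Bool), Dom_pick_trace_py rolls take highest → Spec_pick_trace_py rolls take highest (pick_trace_py rolls take highest)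

-- ===== LEMMAS AND PROOFS =====

-- value at an index, the argsort key, and the argsort itself (proof-side names)
def pvVal (rolls : List Int) (i : Int) : Int := PySem.List.pyGetD rolls i 0
def pvKey (rolls : List Int) (highest : Bool) (i : Int) : Int :=
  if highest then -(pvVal rolls i) else pvVal rolls i
def pvOrder (rolls : List Int) (highest : Bool) : List Int :=
  PySem.List.sorted (PySem.List.pyRange 0 (PySem.List.len rolls) 1)
    (fun i => PySem.List.pyGetD rolls i 0) highest
-- 'key strictly smaller, or equal key and earlier position' — stable order on indices
def pvLex (k : Int → Int) (a b : Int) : Prop := k a < k b ∨ (k a = k b ∧ a < b)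

-- A's marking loop as a recursion over the rolls (state: the remaining multiset)
def pvMarkA : List Int → List Int → List String
  | [], _ => []
  | r :: t, rem =>
    if rem.contains r then pvBold r :: pvMarkA t ((PySem.List.remove? rem r).getD rem)
    else pvStrike r :: pvMarkA t rem

-- quota-style marking: bold while the value's counter is positive (proof intermediate)
def pvMarkB : List Int → (Int → Int) → List String
  | [], _ => []
  | r :: t, c =>
    (if 1 ≤ c r then pvBold r else pvStrike r) :: pvMarkB t (fun v => if v = r then c v - 1 else c v)

lemma pvLoopA (rolls : List Int) : ∀ (rem : List Int) (parts : List String),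
    (rolls.foldl (fun (st : List Int × List String) r =>
      if st.1.contains r then ((PySem.List.remove? st.1 r).getD st.1, st.2 ++ [pvBold r])
      else (st.1, st.2 ++ [pvStrike r])) (rem, parts)).2 = parts ++ pvMarkA rolls rem := by
  induction rolls with
  | nil => intro rem parts; simp [pvMarkA]
  | cons r t ih =>
    intro rem parts
    by_cases h : r ∈ rem
    · have hc : rem.contains r = true := by simpa using h
      simp only [List.foldl_cons, pvMarkA, if_pos hc]
      rw [ih]; simp
    · have hc : ¬ (rem.contains r = true) := by simpa using h
      simp only [List.foldl_cons, pvMarkA, if_neg hc]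
      rw [ih]; simp

lemma pvBridge : ∀ (rolls rem : List Int) (c : Int → Int),
    (∀ v, (rem.count v : Int) = max (c v) 0) → pvMarkA rolls rem = pvMarkB rolls c := by
  intro rolls
  induction rolls with
  | nil => intro rem c _; rfl
  | cons r t ih =>
    intro rem c h
    have hr := h r
    by_cases hm : r ∈ rem
    · have hcount : 0 < rem.count r := List.count_pos_iff.mpr hm
      have hcontains : rem.contains r = true := by simpa using hm
      have hcp : 1 ≤ c r := by omega
      rw [pvMarkA, pvMarkB, if_pos hcontains, if_pos hcp,
          PySem.List.remove?_eq_some_erase rem r hm, Option.getD_some]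
      congr 1
      apply ih
      intro v
      by_cases hv : v = r
      · subst hv
        rw [List.count_erase_self]
        have := h v
        omega
      · rw [List.count_erase_of_ne hv]
        have := h v
        simp [hv]
        omega
    · have hcount : rem.count r = 0 := by
        simpa using List.count_eq_zero_of_not_mem hm
      have hcontains : rem.contains r = false := by simpa using hm
      have hcp : ¬ (1 ≤ c r) := by omega
      rw [pvMarkA, pvMarkB, if_neg (by simpa using hm), if_neg hcp]
      congr 1
      apply ih
      intro v
      by_cases hv : v = r
      · subst hv; simp [hcount] at hr ⊢; omega
      · have := h v
        simp [hv]
        omega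

-- stable insertion keeps the lexicographic (key, arrival) order
lemma pvInsertBy_pairwise (k : Int → Int) (before : Int → Int → Bool)
    (hB : ∀ a b, before a b = true ↔ k a < k b) (x : Int) : ∀ (acc : List Int),
    acc.Pairwise (pvLex k) → (∀ a ∈ acc, a < x) →
    (PySem.List.insertBy before x acc).Pairwise (pvLex k) := by
  intro acc
  induction acc with
  | nil => intro _ _; simp [PySem.List.insertBy, pvLex]
  | cons y t ih =>
    intro hpw hlt
    rw [List.pairwise_cons] at hpw
    obtain ⟨hy, ht⟩ := hpw
    by_cases hb : before x y = true
    · have hxy : k x < k y := (hB x y).mp hb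
      simp only [PySem.List.insertBy, hb, if_true]
      refine List.pairwise_cons.mpr ⟨?_, List.pairwise_cons.mpr ⟨hy, ht⟩⟩
      intro z hz
      rw [List.mem_cons] at hz
      rcases hz with hz | hz
      · rw [hz]; exact Or.inl hxy
      · rcases hy z hz with h1 | ⟨h1, _⟩
        · exact Or.inl (lt_trans hxy h1)
        · exact Or.inl (h1 ▸ hxy)
    · have hxy : ¬ k x < k y := fun h => hb ((hB x y).mpr h)
      simp only [PySem.List.insertBy, hb]
      refine List.pairwise_cons.mpr ⟨?_, ih ht (fun a ha => hlt a (List.mem_cons_of_mem y ha))⟩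
      intro z hz
      rw [PySem.List.mem_insertBy] at hz
      rcases hz with hz | hz
      · rw [hz]
        by_cases hk : k y < k x
        · exact Or.inl hk
        · exact Or.inr ⟨le_antisymm (not_lt.mp hxy) (not_lt.mp hk), hlt y (by simp)⟩
      · exact hy z hz

lemma pvFoldInsert_pairwise (k : Int → Int) (before : Int → Int → Bool)
    (hB : ∀ a b, before a b = true ↔ k a < k b) : ∀ (xs acc : List Int),
    acc.Pairwise (pvLex k) → (∀ a ∈ acc, ∀ x ∈ xs, a < x) → xs.Pairwise (fun a b => a < b) →
    (xs.foldl (fun acc x => PySem.List.insertBy before x acc) acc).Pairwise (pvLex k) := by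
  intro xs
  induction xs with
  | nil => intro acc h _ _; simpa using h
  | cons x t ih =>
    intro acc hacc hlt hxs
    rw [List.pairwise_cons] at hxs
    simp only [List.foldl_cons]
    apply ih
    · exact pvInsertBy_pairwise k before hB x acc hacc (fun a ha => hlt a ha x (by simp))
    · intro a ha y hy
      rw [PySem.List.mem_insertBy] at ha
      rcases ha with ha | ha
      · rw [ha]; exact hxs.1 y hy
      · exact hlt a ha y (by simp [hy])
    · exact hxs.2

lemma pvOrder_pairwise (rolls : List Int) (highest : Bool) :
    (pvOrder rolls highest).Pairwise (pvLex (pvKey rolls highest)) := by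
  have hR : (PySem.List.pyRange 0 (PySem.List.len rolls) 1).Pairwise (fun a b => a < b) :=
    PySem.List.pairwise_lt_pyRange_one 0 (PySem.List.len rolls)
  cases highest with
  | false =>
    unfold pvOrder
    rw [PySem.List.sorted_eq_foldl_insertBy]
    apply pvFoldInsert_pairwise (pvKey rolls false)
      (fun a b => decide (PySem.List.pyGetD rolls a 0 < PySem.List.pyGetD rolls b 0))
      (by intro a b; simp [pvKey, pvVal]) _ [] List.Pairwise.nil (by simp) hR
  | true =>
    unfold pvOrder
    rw [PySem.List.sorted_rev_eq_foldl_insertBy]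
    apply pvFoldInsert_pairwise (pvKey rolls true)
      (fun a b => decide (PySem.List.pyGetD rolls b 0 < PySem.List.pyGetD rolls a 0))
      (by intro a b; simp [pvKey, pvVal]) _ [] List.Pairwise.nil (by simp) hR

-- the values read off along the argsort are the sorted values
lemma pvMapValRange (rolls : List Int) :
    (PySem.List.pyRange 0 (PySem.List.len rolls) 1).map (pvVal rolls) = rolls := by
  rw [show pvVal rolls = (fun j => PySem.List.pyGetD rolls j 0) from rfl]
  exact PySem.List.map_pyGetD_pyRange_zero rolls 0

lemma pvSortedVals (rolls : List Int) (highest : Bool) :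
    PySem.List.sorted rolls (fun x => x) highest = (pvOrder rolls highest).map (pvVal rolls) := by
  have hperm : ((pvOrder rolls highest).map (pvVal rolls)).Perm rolls := by
    have h1 := (PySem.List.sorted_perm (PySem.List.pyRange 0 (PySem.List.len rolls) 1)
      (fun i => PySem.List.pyGetD rolls i 0) highest).map (pvVal rolls)
    rw [pvMapValRange] at h1
    exact h1
  have hperm2 : (PySem.List.sorted rolls (fun x => x) highest).Perm
      ((pvOrder rolls highest).map (pvVal rolls)) :=
    (PySem.List.sorted_perm rolls (fun x => x) highest).trans hperm.symm
  have hO := pvOrder_pairwise rolls highest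
  cases highest with
  | false =>
    have hpw1 : (PySem.List.sorted rolls (fun x => x) false).Pairwise (fun a b => a ≤ b) := by
      simpa using PySem.List.sorted_pairwise rolls (fun x => x)
    have hpw2 : ((pvOrder rolls false).map (pvVal rolls)).Pairwise (fun a b => a ≤ b) := by
      refine List.Pairwise.map (pvVal rolls) ?_ hO
      intro a b h
      have hka : pvKey rolls false a = pvVal rolls a := by simp [pvKey]
      have hkb : pvKey rolls false b = pvVal rolls b := by simp [pvKey]
      rcases h with h | ⟨h, _⟩ <;> rw [hka, hkb] at h <;> omega
    exact List.eq_of_perm_of_sorted (fun a b _ _ h1 h2 => le_antisymm h1 h2) hpw1 hpw2 hperm2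
  | true =>
    have hpw1 : (PySem.List.sorted rolls (fun x => x) true).Pairwise (fun a b => b ≤ a) := by
      simpa using PySem.List.sorted_pairwise_rev rolls (fun x => x)
    have hpw2 : ((pvOrder rolls true).map (pvVal rolls)).Pairwise (fun a b => b ≤ a) := by
      refine List.Pairwise.map (pvVal rolls) ?_ hO
      intro a b h
      have hka : pvKey rolls true a = -(pvVal rolls a) := by simp [pvKey]
      have hkb : pvKey rolls true b = -(pvVal rolls b) := by simp [pvKey]
      rcases h with h | ⟨h, _⟩ <;> rw [hka, hkb] at h <;> omega
    exact List.eq_of_perm_of_sorted (fun a b _ _ h1 h2 => le_antisymm h2 h1) hpw1 hpw2 hperm2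

-- slice xs[:t] is a clamped take, for any int t
lemma pvSlice_take (xs : List Int) (t : Int) :
    PySem.List.slice xs none (some t) = xs.take (PySem.List.clampIdx xs.length t) := by
  simp [PySem.List.slice]

-- the picked indices carrying a given value, in argsort order = in increasing order
lemma pvFilter_order (rolls : List Int) (highest : Bool) (v : Int) :
    (pvOrder rolls highest).filter (fun j => decide (pvVal rolls j = v))
      = (PySem.List.pyRange 0 (PySem.List.len rolls) 1).filter (fun j => decide (pvVal rolls j = v)) := by
  have hperm := (PySem.List.sorted_perm (PySem.List.pyRange 0 (PySem.List.len rolls) 1)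
      (fun i => PySem.List.pyGetD rolls i 0) highest).filter (fun j => decide (pvVal rolls j = v))
  have h1 : ((pvOrder rolls highest).filter (fun j => decide (pvVal rolls j = v))).Pairwise
      (fun a b => a < b) := by
    have hpw := (pvOrder_pairwise rolls highest).sublist
      (List.filter_sublist (p := fun j => decide (pvVal rolls j = v)))
    refine List.Pairwise.imp_of_mem ?_ hpw
    intro a b ha hb hab
    rw [List.mem_filter] at ha hb
    have hva : pvVal rolls a = v := by simpa using ha.2
    have hvb : pvVal rolls b = v := by simpa using hb.2
    rcases hab with h | ⟨_, h⟩
    · exfalso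
      have : pvKey rolls highest a = pvKey rolls highest b := by
        simp [pvKey, hva, hvb]
      omega
    · exact h
  have h2 : ((PySem.List.pyRange 0 (PySem.List.len rolls) 1).filter
      (fun j => decide (pvVal rolls j = v))).Pairwise (fun a b => a < b) :=
    (PySem.List.pairwise_lt_pyRange_one 0 (PySem.List.len rolls)).sublist
      (List.filter_sublist (p := fun j => decide (pvVal rolls j = v)))
  exact List.eq_of_perm_of_sorted (fun a b _ _ hx hy => absurd hy (lt_asymm hx)) h1 h2 hperm

-- membership in a prefix of a strictly increasing list, by counting smaller elements
lemma pvMemTake : ∀ (l : List Int), l.Pairwise (fun a b => a < b) → ∀ (i : Int), i ∈ l →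
    ∀ (m : Nat), (i ∈ l.take m ↔ l.countP (fun j => decide (j < i)) < m) := by
  intro l
  induction l with
  | nil => intro _ i hi; exact absurd hi (by simp)
  | cons a t ih =>
    intro hpw i hi m
    rw [List.pairwise_cons] at hpw
    obtain ⟨ha, ht⟩ := hpw
    rw [List.mem_cons] at hi
    rcases hi with rfl | hi
    · have hc : (i :: t).countP (fun j => decide (j < i)) = 0 := by
        rw [List.countP_eq_zero]
        intro j hj
        rw [List.mem_cons] at hj
        rcases hj with rfl | hj
        · simp
        · have := ha j hj; simp; omega
      rw [hc]
      cases m with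
      | zero => simp
      | succ m' => simp
    · have hai : a < i := ha i hi
      have hcc : (a :: t).countP (fun j => decide (j < i))
          = t.countP (fun j => decide (j < i)) + 1 := by
        rw [List.countP_cons]
        simp [hai]
      have hane : ¬ (i = a) := by
        intro h; subst h; omega
      cases m with
      | zero => simp [hcc]
      | succ m' =>
        rw [hcc]
        simp only [List.take_succ_cons, List.mem_cons]
        rw [ih ht i hi m']
        constructor
        · intro h; rcases h with h | h
          · exact absurd h hane
          · omega
        · intro h; exact Or.inr (by omega)

-- the picked-position test, characterised by an occurrence count
lemma pvPickedIff (rolls : List Int) (highest : Bool) (m : Nat) (j : Nat) (hj : j < rolls.length) :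
    ((j : Int) ∈ (pvOrder rolls highest).take m ↔
      (rolls.take j).count rolls[j]
        < (((pvOrder rolls highest).take m).map (pvVal rolls)).count rolls[j]) := by
  have hvj : pvVal rolls (j : Int) = rolls[j] := by
    simp [pvVal, PySem.List.pyGetD_natCast, List.getD_eq_getElem?_getD, List.getElem?_eq_getElem hj]
  -- notation
  have hbeq : ∀ (l : List Int), l.count rolls[j] = l.countP (fun x => decide (x = rolls[j])) := by
    intro l
    rw [List.count]
    apply List.countP_congr
    intro x _
    simp
  -- the RHS count is the length of the filtered picked prefix
  have hcount1 : (((pvOrder rolls highest).take m).map (pvVal rolls)).count rolls[j]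
      = (((pvOrder rolls highest).take m).filter (fun t => decide (pvVal rolls t = rolls[j]))).length := by
    rw [hbeq, List.countP_map, List.countP_eq_length_filter]
    rfl
  -- filtered picked prefix is a prefix of the filtered whole
  have hsplit : ((pvOrder rolls highest).filter (fun t => decide (pvVal rolls t = rolls[j]))).take
        ((((pvOrder rolls highest).take m).filter (fun t => decide (pvVal rolls t = rolls[j]))).length)
      = ((pvOrder rolls highest).take m).filter (fun t => decide (pvVal rolls t = rolls[j])) := by
    have happ : (pvOrder rolls highest).filter (fun t => decide (pvVal rolls t = rolls[j]))
        = ((pvOrder rolls highest).take m).filter (fun t => decide (pvVal rolls t = rolls[j]))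
          ++ ((pvOrder rolls highest).drop m).filter (fun t => decide (pvVal rolls t = rolls[j])) := by
      rw [← List.filter_append, List.take_append_drop]
    rw [happ]
    exact List.take_left' rfl
  -- facts about the range filter
  have hjR : (j : Int) ∈ PySem.List.pyRange 0 (PySem.List.len rolls) 1 := by
    rw [PySem.List.mem_pyRange_one]
    constructor
    · omega
    · simp [PySem.List.len]; omega
  have hjF : (j : Int) ∈ (PySem.List.pyRange 0 (PySem.List.len rolls) 1).filter
      (fun t => decide (pvVal rolls t = rolls[j])) := by
    rw [List.mem_filter]
    exact ⟨hjR, by simp [hvj]⟩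
  have hFpw : ((PySem.List.pyRange 0 (PySem.List.len rolls) 1).filter
      (fun t => decide (pvVal rolls t = rolls[j]))).Pairwise (fun a b => a < b) :=
    (PySem.List.pairwise_lt_pyRange_one 0 (PySem.List.len rolls)).sublist
      (List.filter_sublist (p := fun t => decide (pvVal rolls t = rolls[j])))
  -- step 3: membership chain
  have hmem : ((j : Int) ∈ (pvOrder rolls highest).take m ↔
      ((PySem.List.pyRange 0 (PySem.List.len rolls) 1).filter
        (fun t => decide (pvVal rolls t = rolls[j]))).countP (fun t => decide (t < (j : Int)))
      < (((pvOrder rolls highest).take m).filter (fun t => decide (pvVal rolls t = rolls[j]))).length) := by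
    rw [← pvMemTake _ hFpw _ hjF]
    rw [← pvFilter_order, hsplit]
    rw [List.mem_filter]
    simp [hvj]
  rw [hmem, hcount1]
  -- step 5/6: the left count equals the count in rolls.take j
  have hRsplit : PySem.List.pyRange 0 (PySem.List.len rolls) 1
      = PySem.List.pyRange 0 (j : Int) 1 ++ PySem.List.pyRange (j : Int) (PySem.List.len rolls) 1 := by
    apply PySem.List.pyRange_one_append
    · omega
    · simp [PySem.List.len]; omega
  have hleft : ((PySem.List.pyRange 0 (PySem.List.len rolls) 1).filter
        (fun t => decide (pvVal rolls t = rolls[j]))).countP (fun t => decide (t < (j : Int)))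
      = (rolls.take j).count rolls[j] := by
    rw [List.countP_filter, hRsplit, List.countP_append]
    have h2 : (PySem.List.pyRange (j : Int) (PySem.List.len rolls) 1).countP
        (fun a => decide (a < (j : Int)) && decide (pvVal rolls a = rolls[j])) = 0 := by
      rw [List.countP_eq_zero]
      intro t ht
      rw [PySem.List.mem_pyRange_one] at ht
      simp
      omega
    rw [h2, Nat.add_zero]
    have h1 : (PySem.List.pyRange 0 (j : Int) 1).countP
        (fun a => decide (a < (j : Int)) && decide (pvVal rolls a = rolls[j]))
        = (PySem.List.pyRange 0 (j : Int) 1).countP (fun a => decide (pvVal rolls a = rolls[j])) := by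
      apply List.countP_congr
      intro t ht
      rw [PySem.List.mem_pyRange_one] at ht
      simp
      intro _
      omega
    rw [h1]
    -- map over the prefix range is rolls.take j
    have hmap : (PySem.List.pyRange 0 (j : Int) 1).map (pvVal rolls) = rolls.take j := by
      have hall := pvMapValRange rolls
      rw [hRsplit, List.map_append] at hall
      have hlen : ((PySem.List.pyRange 0 (j : Int) 1).map (pvVal rolls)).length = j := by
        rw [List.length_map, PySem.List.length_pyRange_one]
        omega
      have h2 : List.take j ((PySem.List.pyRange 0 (j : Int) 1).map (pvVal rolls)
          ++ (PySem.List.pyRange (j : Int) (PySem.List.len rolls) 1).map (pvVal rolls))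
          = (PySem.List.pyRange 0 (j : Int) 1).map (pvVal rolls) := List.take_left' hlen
      rw [hall] at h2
      exact h2.symm
    rw [hbeq, ← hmap, List.countP_map]
    rfl
  rw [hleft]

-- B's enumerate pass equals quota marking, given the per-position characterisation
lemma pvMarkB_enum : ∀ (l : List Int) (s : Int) (cc : Int → Int) (pk : Int → Bool),
    (∀ (j : Nat), (hj : j < l.length) → (pk (s + (j : Int)) = true ↔ ((l.take j).count l[j] : Int) < cc l[j])) →
    (PySem.List.enumerate l s).map (fun p => if pk p.1 then pvBold p.2 else pvStrike p.2) = pvMarkB l cc := by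
  intro l
  induction l with
  | nil => intro s cc pk _; simp [PySem.List.enumerate_nil, pvMarkB]
  | cons x t ih =>
    intro s cc pk H
    rw [PySem.List.enumerate_cons, List.map_cons, pvMarkB]
    congr 1
    · have h0 := H 0 (by simp)
      simp only [Nat.cast_zero, add_zero, List.take_zero, List.count_nil,
        List.getElem_cons_zero, Nat.cast_zero] at h0
      by_cases hx : pk s = true
      · rw [if_pos hx, if_pos (by have := h0.mp hx; omega)]
      · rw [if_neg hx, if_neg (by intro h; exact hx (h0.mpr (by omega)))]
    · apply ih
      intro j hj
      have hstep := H (j + 1) (by simpa using Nat.succ_lt_succ hj)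
      have harith : s + ((j : Int) + 1) = s + 1 + (j : Int) := by ring
      rw [List.getElem_cons_succ] at hstep
      rw [List.take_succ_cons, List.count_cons] at hstep
      push_cast at hstep
      rw [harith] at hstep
      rw [hstep]
      by_cases hv : t[j] = x
      · simp [hv]
        omega
      · have : ¬ (x = t[j]) := fun h => hv h.symm
        simp [this, hv]

-- ===== VERDICT (by name: the statement is the Claim_ definition above) =====
theorem pick_trace_py_spec : Claim_equal_pick_trace_py := by
  intro rolls take highest _
  simp only [Spec_pick_trace_py, pick_trace_py, pick_trace_py_alt]
  rw [pvLoopA]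
  simp only [List.nil_append]
  have hOlen : (pvOrder rolls highest).length = rolls.length := by
    unfold pvOrder
    rw [PySem.List.length_sorted, PySem.List.length_pyRange_one]
    simp [PySem.List.len]
  have hSlen : (PySem.List.sorted rolls (fun x => x) highest).length = rolls.length :=
    PySem.List.length_sorted rolls (fun x => x) highest
  -- the selected value-multiset is the values read off the picked positions
  have hsel : PySem.List.slice (PySem.List.sorted rolls (fun x => x) highest) none (some take)
      = ((pvOrder rolls highest).take (PySem.List.clampIdx rolls.length take)).map (pvVal rolls) := by
    rw [pvSlice_take, hSlen, pvSortedVals, List.map_take]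
  have hpick : PySem.List.slice (pvOrder rolls highest) none (some take)
      = (pvOrder rolls highest).take (PySem.List.clampIdx rolls.length take) := by
    rw [pvSlice_take, hOlen]
  rw [pvBridge rolls
      (PySem.List.slice (PySem.List.sorted rolls (fun x => x) highest) none (some take))
      (fun v => ((PySem.List.slice (PySem.List.sorted rolls (fun x => x) highest) none (some take)).count v : Int))
      (by intro v; simp)]
  show _ = PySem.Str.join " + " _
  congr 1
  symm
  apply pvMarkB_enum
  intro j hj
  rw [zero_add]
  have hfold : PySem.List.sorted (PySem.List.pyRange 0 (PySem.List.len rolls) 1)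
      (fun i => PySem.List.pyGetD rolls i 0) highest = pvOrder rolls highest := rfl
  rw [hfold]
  have hcontains : ∀ (X : List Int) (i : Int),
      (PySem.Set.contains (PySem.Set.ofList X) i = true ↔ i ∈ X) := by
    intro X i
    constructor
    · intro h
      exact (PySem.Set.mem_ofList X i).mp (by simpa [PySem.Set.contains] using h)
    · intro h
      simpa [PySem.Set.contains] using (PySem.Set.mem_ofList X i).mpr h
  rw [hcontains, hpick, hsel]
  rw [pvPickedIff rolls highest (PySem.List.clampIdx rolls.length take) j hj]
  exact Iff.symm Int.ofNat_lt
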